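-- pv_equiv track=rewrite | github.com/ankitsumitg/mrnd-python | MockTest/mocktest1_probem4.py | is_oct_magic
-- ===== SOURCE A (Python) =====
-- def is_oct_magic(number):
--     try:
--         if number <0:raise ValueError
--         #other2dec = lambda n, other: sum([ (int(v) * other ** i) for i, v in enumerate(list(str(n))[ ::-1 ]) ])
--         #new_num = number if number >= 0 else -1 * number
--         #a = other2dec(new_num, 10)
--         a = int(oct(number)[2:])
--         visited = set()
--         while 1:
--             if a == 1:
--                 return True
--             a = sum(int(c) ** 2 for c in str(a))
--             a = int(oct(a)[ 2: ])
--             if a in visited: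
--                 return False
--             visited.add(a)
--     except ValueError:
--         raise ValueError
-- ===== SOURCE B (Python) =====
-- def _step(a):
--     return int(oct(sum(int(c) ** 2 for c in str(a)))[2:])
--
--
-- def is_oct_magic(number):
--     if number < 0:
--         raise ValueError
--     slow = int(oct(number)[2:])
--     fast = _step(slow)
--     while fast != 1 and slow != fast:
--         slow = _step(slow)
--         fast = _step(_step(fast))
--     return fast == 1
-- ===== Notes on version B (the rewrite author's own statement) =====
-- stated objective: alternative
-- what changed: Replaces the visited-set cycle detection (hash set plus membership test per iteration) with Floyd's tortoise-and-hare two-pointer cycle detection over a factored-out step function, using O(1) memory and no set at all.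
import Mathlib
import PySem

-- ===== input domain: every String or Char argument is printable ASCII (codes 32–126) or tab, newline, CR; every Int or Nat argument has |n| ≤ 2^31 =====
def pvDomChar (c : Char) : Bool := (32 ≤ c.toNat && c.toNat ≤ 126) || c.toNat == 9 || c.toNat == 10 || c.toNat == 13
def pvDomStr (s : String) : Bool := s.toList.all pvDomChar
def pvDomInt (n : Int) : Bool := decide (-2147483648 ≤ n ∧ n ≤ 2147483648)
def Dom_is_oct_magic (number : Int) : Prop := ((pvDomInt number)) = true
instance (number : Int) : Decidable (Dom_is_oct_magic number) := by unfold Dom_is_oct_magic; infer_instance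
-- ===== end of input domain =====

-- B replaces A's visited-set cycle detection by Floyd's two-pointer cycle detection (O(1) memory,
-- no set or membership test); equivalence is proved for all number ≥ 0 (A raises ValueError below 0).

-- ===== PORT A =====
-- hand-ported primitives (PySem has no oct): for m ≥ 0, Python's int(oct(m)[2:]) re-reads the octal
-- digit string of m as a decimal numeral, which is exactly Nat.ofDigits 10 (Nat.digits 8 m);
-- and sum(int(c) ** 2 for c in str(a)) for a ≥ 0 is the sum of squared decimal digits of a
-- (the digit order is irrelevant to the sum). Both are exact on the nonnegative ints reached here.
def pvOctDec (n : Nat) : Nat := Nat.ofDigits 10 (Nat.digits 8 n)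

def pvDigitSqSum (n : Nat) : Nat := ((Nat.digits 10 n).map (fun d => d ^ 2)).sum

-- the 'while 1' loop of A, with fuel for totality (none = fuel exhausted; proven unreachable
-- for fuel 100000 in the lemmas below, the Python loop itself runs forever by intent)
def is_oct_magicLoop : Int → PySem.Set Int → Nat → Option Bool
  | _, _, 0 => none
  | a, visited, Nat.succ n =>
    if a = 1 then some true
    else
      let a1 : Int := (pvDigitSqSum a.toNat : Int)
      let a2 : Int := (pvOctDec a1.toNat : Int)
      if PySem.Set.contains visited a2 then some false
      else is_oct_magicLoop a2 (PySem.Set.add visited a2) n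

def is_oct_magic (number : Int) : Bool :=
  if number < 0 then false  -- Python: raise ValueError (excluded by Pre_)
  else (is_oct_magicLoop ((pvOctDec number.toNat : Nat) : Int) PySem.Set.empty 100000).getD false

-- ===== PORT B =====
def pvStep (a : Int) : Int := (pvOctDec (pvDigitSqSum a.toNat) : Int)

-- Floyd's tortoise/hare loop, with fuel for totality (false = fuel exhausted; proven
-- unreachable for fuel 100000 in the lemmas below)
def floydLoop : Int → Int → Nat → Bool
  | _, _, 0 => false
  | slow, fast, Nat.succ n =>
    if fast = 1 then true
    else if slow = fast then false
    else floydLoop (pvStep slow) (pvStep (pvStep fast)) n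

def is_oct_magic_alt (number : Int) : Bool :=
  if number < 0 then false  -- Python: raise ValueError (excluded by Pre_)
  else
    let slow : Int := (pvOctDec number.toNat : Nat)
    floydLoop slow (pvStep slow) 100000

-- ===== PRECONDITION & SPEC =====
-- Pre_ excludes exactly the negative inputs, on which the Python A raises ValueError.
def Pre_is_oct_magic (number : Int) : Prop := 0 ≤ number
instance (number : Int) : Decidable (Pre_is_oct_magic number) := by unfold Pre_is_oct_magic; infer_instance
def pvWitness_is_oct_magic : Int := 7

def Spec_is_oct_magic (number : Int) (out : Bool) : Prop := out = is_oct_magic_alt number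
instance (number : Int) (out : Bool) : Decidable (Spec_is_oct_magic number out) := by unfold Spec_is_oct_magic; infer_instance

-- ===== CLAIM (what is proved, stated in full; the proofs are below) =====
def Claim_equal_is_oct_magic : Prop := ∀ (number : Int), Dom_is_oct_magic number → Pre_is_oct_magic number → Spec_is_oct_magic number (is_oct_magic number)

-- ===== LEMMAS AND PROOFS =====

lemma pvStep_fold (a : Int) : ((pvOctDec (pvDigitSqSum a.toNat) : Nat) : Int) = pvStep a := rfl

-- bounds ---------------------------------------------------------------

lemma pvDigitSqSum_le {n k : Nat} (h : n < 10 ^ k) : pvDigitSqSum n ≤ 81 * k := by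
  have hlen : (Nat.digits 10 n).length ≤ k := (Nat.digits_length_le_iff (by norm_num) n).mpr h
  have hsum : ((Nat.digits 10 n).map (fun d => d ^ 2)).sum ≤
      ((Nat.digits 10 n).map (fun d => d ^ 2)).length • 81 := by
    apply List.sum_le_card_nsmul
    intro x hx
    obtain ⟨d, hd, rfl⟩ := List.mem_map.mp hx
    have : d < 10 := Nat.digits_lt_base (by norm_num) hd
    nlinarith
  simp only [List.length_map, smul_eq_mul] at hsum
  calc pvDigitSqSum n ≤ (Nat.digits 10 n).length * 81 := hsum
    _ ≤ k * 81 := Nat.mul_le_mul_right _ hlen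
    _ = 81 * k := Nat.mul_comm _ _

lemma pvOctDec_lt {n k : Nat} (h : n < 8 ^ k) : pvOctDec n < 10 ^ k := by
  have hlen : (Nat.digits 8 n).length ≤ k := (Nat.digits_length_le_iff (by norm_num) n).mpr h
  have h1 : Nat.ofDigits 10 (Nat.digits 8 n) < 10 ^ (Nat.digits 8 n).length := by
    apply Nat.ofDigits_lt_base_pow_length (by norm_num)
    intro x hx
    exact lt_trans (Nat.digits_lt_base (by norm_num) hx) (by norm_num)
  exact lt_of_lt_of_le h1 (Nat.pow_le_pow_right (by norm_num) hlen)

lemma pvStep_bound {a : Int} (h : a < 10 ^ 11) : 0 ≤ pvStep a ∧ pvStep a < 10 ^ 4 := by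
  have hn : a.toNat < 10 ^ 11 := by omega
  have h1 : pvDigitSqSum a.toNat ≤ 81 * 11 := pvDigitSqSum_le hn
  have h2 : pvDigitSqSum a.toNat < 8 ^ 4 := by omega
  have h3 : pvOctDec (pvDigitSqSum a.toNat) < 10 ^ 4 := pvOctDec_lt h2
  constructor
  · exact Int.natCast_nonneg _
  · unfold pvStep; exact_mod_cast h3

lemma pvStep_iter_bound {a : Int} (_h0 : 0 ≤ a) (h1 : a < 10 ^ 11) :
    ∀ i, 1 ≤ i → 0 ≤ pvStep^[i] a ∧ pvStep^[i] a < 10 ^ 4 := by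
  intro i hi
  induction i with
  | zero => omega
  | succ j ih =>
    rw [Function.iterate_succ_apply']
    rcases Nat.eq_zero_or_pos j with hj | hj
    · subst hj; simpa using pvStep_bound h1
    · have hb := ih hj
      exact pvStep_bound (by have := hb.2; omega)

-- the fixed point 1 ---------------------------------------------------

lemma pvStep_one : pvStep 1 = 1 := by
  simp [pvStep, pvOctDec, pvDigitSqSum]

lemma pvStep_iter_one (m : Nat) : pvStep^[m] 1 = 1 := by
  induction m with
  | zero => rfl
  | succ j ih => rw [Function.iterate_succ_apply', ih, pvStep_one]

lemma pvStep_one_after {a : Int} {k m : Nat} (h : pvStep^[k] a = 1) (hm : k ≤ m) :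
    pvStep^[m] a = 1 := by
  have : m = (m - k) + k := by omega
  rw [this, Function.iterate_add_apply, h, pvStep_iter_one]

-- periodicity ----------------------------------------------------------

lemma pvStep_per_add {a : Int} {s p : Nat} (hp : pvStep^[s + p] a = pvStep^[s] a) :
    ∀ j, pvStep^[s + j + p] a = pvStep^[s + j] a := by
  intro j
  induction j with
  | zero => simpa using hp
  | succ j ih =>
    have e1 : s + (j + 1) + p = (s + j + p) + 1 := by omega
    have e2 : s + (j + 1) = (s + j) + 1 := by omega
    rw [e1, e2, Function.iterate_succ_apply', Function.iterate_succ_apply', ih]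

lemma pvStep_per_mul {a : Int} {s p : Nat} (hp : pvStep^[s + p] a = pvStep^[s] a) :
    ∀ q j, pvStep^[s + j + q * p] a = pvStep^[s + j] a := by
  intro q
  induction q with
  | zero => intro j; simp
  | succ q ih =>
    intro j
    have e : s + j + (q + 1) * p = s + (j + q * p) + p := by ring
    rw [e, pvStep_per_add hp (j + q * p)]
    have e2 : s + (j + q * p) = s + j + q * p := by omega
    rw [e2, ih j]

lemma pvStep_rep_one {a : Int} {s t k : Nat} (hst : s < t)
    (he : pvStep^[s] a = pvStep^[t] a) (h1 : pvStep^[k] a = 1) : pvStep^[s] a = 1 := by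
  have hp : pvStep^[s + (t - s)] a = pvStep^[s] a := by
    have : s + (t - s) = t := by omega
    rw [this, he]
  have hq := pvStep_per_mul hp k 0
  have hk : k ≤ s + 0 + k * (t - s) := by
    have : 1 ≤ t - s := by omega
    nlinarith
  calc pvStep^[s] a = pvStep^[s + 0] a := by norm_num
    _ = pvStep^[s + 0 + k * (t - s)] a := (hq).symm
    _ = 1 := pvStep_one_after h1 hk

-- A's loop -------------------------------------------------------------

lemma loopA_true : ∀ (k : Nat) (a : Int) (vis : PySem.Set Int) (n : Nat),
    pvStep^[k] a = 1 → (∀ m, m < k → pvStep^[m] a ≠ 1) →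
    (∀ x ∈ vis, ∃ kx, pvStep^[kx] x = 1 ∧ (∀ m, m < kx → pvStep^[m] x ≠ 1) ∧ k ≤ kx) →
    k < n → is_oct_magicLoop a vis n = some true := by
  intro k
  induction k with
  | zero =>
    intro a vis n h1 _ _ hn
    obtain ⟨n', rfl⟩ : ∃ n', n = n' + 1 := ⟨n - 1, by omega⟩
    simp only [Function.iterate_zero_apply] at h1
    simp [is_oct_magicLoop, h1]
  | succ k ih =>
    intro a vis n h1 hmin hvis hn
    obtain ⟨n', rfl⟩ : ∃ n', n = n' + 1 := ⟨n - 1, by omega⟩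
    have ha : a ≠ 1 := by
      have := hmin 0 (Nat.succ_pos k); simpa using this
    have hstep1 : pvStep^[k] (pvStep a) = 1 := by
      rw [← Function.iterate_succ_apply]; exact h1
    have hstepmin : ∀ m, m < k → pvStep^[m] (pvStep a) ≠ 1 := by
      intro m hm
      rw [← Function.iterate_succ_apply]
      exact hmin (m + 1) (by omega)
    have hnotmem : pvStep a ∉ vis := by
      intro hmem
      obtain ⟨kx, hkx1, hkxmin, hkxle⟩ := hvis _ hmem
      rcases Nat.lt_or_ge k kx with h | h
      · exact hkxmin k h hstep1
      · omega
    simp only [is_oct_magicLoop, if_neg ha, Int.toNat_natCast, pvStep_fold]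
    rw [if_neg (by simpa [PySem.Set.contains_iff] using hnotmem)]
    apply ih _ _ _ hstep1 hstepmin _ (by omega)
    intro x hx
    rcases (PySem.Set.mem_add vis (pvStep a) x).mp hx with hx | rfl
    · obtain ⟨kx, h1', h2', h3'⟩ := hvis x hx
      exact ⟨kx, h1', h2', by omega⟩
    · exact ⟨k, hstep1, hstepmin, le_refl k⟩

lemma loopA_false : ∀ (n : Nat) (a : Int) (vis : PySem.Set Int),
    (∀ m, pvStep^[m] a ≠ 1) → a < 10 ^ 11 → vis.Nodup →
    (∀ x ∈ vis, 0 ≤ x ∧ x < 10 ^ 4) → 10001 ≤ vis.length + n →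
    is_oct_magicLoop a vis n = some false := by
  intro n
  induction n with
  | zero =>
    intro a vis _ _ hnd hmem hlen
    exfalso
    have hsub : vis.toFinset ⊆ Finset.Icc (0 : Int) 9999 := by
      intro x hx
      have := hmem x (List.mem_toFinset.mp hx)
      simp only [Finset.mem_Icc]; omega
    have hcard : vis.toFinset.card ≤ (Finset.Icc (0 : Int) 9999).card := Finset.card_le_card hsub
    rw [List.toFinset_card_of_nodup hnd, Int.card_Icc] at hcard
    simp at hcard
    omega
  | succ n ih =>
    intro a vis hno hbnd hnd hmem hlen
    have ha : a ≠ 1 := by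
      have := hno 0; simpa using this
    have hb := pvStep_bound hbnd
    simp only [is_oct_magicLoop, if_neg ha, Int.toNat_natCast, pvStep_fold]
    by_cases hmem2 : pvStep a ∈ vis
    · rw [if_pos (by simpa [PySem.Set.contains_iff] using hmem2)]
    · rw [if_neg (by simpa [PySem.Set.contains_iff] using hmem2)]
      apply ih
      · intro m
        rw [← Function.iterate_succ_apply]
        exact hno (m + 1)
      · omega
      · exact PySem.Set.nodup_add vis (pvStep a) hnd
      · intro x hx
        rcases (PySem.Set.mem_add vis (pvStep a) x).mp hx with hx | rfl
        · exact hmem x hx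
        · exact hb
      · rw [PySem.Set.add_of_not_mem hmem2, List.length_append]
        simp; omega

-- B's loop -------------------------------------------------------------

lemma floyd_run : ∀ (n : Nat) (a : Int) (i : Nat),
    (∃ j, i ≤ j ∧ j < i + n ∧ (pvStep^[2 * j + 1] a = 1 ∨ pvStep^[j] a = pvStep^[2 * j + 1] a)) →
    (floydLoop (pvStep^[i] a) (pvStep^[2 * i + 1] a) n = true ↔ ∃ k, pvStep^[k] a = 1) := by
  intro n
  induction n with
  | zero =>
    intro a i ⟨j, h1, h2, _⟩
    omega
  | succ n ih =>
    intro a i hex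
    by_cases hf : pvStep^[2 * i + 1] a = 1
    · simp only [floydLoop, if_pos hf]
      exact iff_of_true (by trivial) ⟨2 * i + 1, hf⟩
    · by_cases hs : pvStep^[i] a = pvStep^[2 * i + 1] a
      · simp only [floydLoop, if_neg hf, if_pos hs]
        refine iff_of_false (by simp) ?_
        rintro ⟨k, hk⟩
        have h1 : pvStep^[i] a = 1 := pvStep_rep_one (by omega) hs hk
        exact hf (pvStep_one_after h1 (by omega))
      · simp only [floydLoop, if_neg hf, if_neg hs]
        have e1 : pvStep (pvStep^[i] a) = pvStep^[i + 1] a := (Function.iterate_succ_apply' _ _ _).symm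
        have e2 : pvStep (pvStep (pvStep^[2 * i + 1] a)) = pvStep^[2 * (i + 1) + 1] a := by
          have t1 := (Function.iterate_succ_apply' pvStep (2 * i + 1) a).symm
          have t2 := (Function.iterate_succ_apply' pvStep (2 * i + 1 + 1) a).symm
          have e3 : (2 * i + 1 + 1).succ = 2 * (i + 1) + 1 := by omega
          rw [t1, t2, e3]
        rw [e1, e2]
        apply ih
        obtain ⟨j, hj1, hj2, hj3⟩ := hex
        refine ⟨j, ?_, by omega, hj3⟩
        rcases Nat.eq_or_lt_of_le hj1 with rfl | h
        · exfalso; rcases hj3 with h | h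
          · exact hf h
          · exact hs h
        · omega

-- bounds on the first index reaching 1, and existence of a repetition --

lemma first_one_le {a : Int} (h0 : 0 ≤ a) (h1 : a < 10 ^ 11)
    (hP : ∃ k, pvStep^[k] a = 1) : Nat.find hP ≤ 10000 := by
  set k := Nat.find hP with hk
  by_contra hgt
  rw [not_le] at hgt
  have hmaps : Set.MapsTo (fun i => pvStep^[i] a) ↑(Finset.Icc 1 k) ↑(Finset.Icc (0 : Int) 9999) := by
    intro i hi
    simp only [Finset.coe_Icc, Set.mem_Icc] at hi
    have := pvStep_iter_bound h0 h1 i hi.1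
    simp only [Finset.coe_Icc, Set.mem_Icc]
    omega
  have hinj : Set.InjOn (fun i => pvStep^[i] a) ↑(Finset.Icc 1 k) := by
    intro i hi j hj hij
    simp only [Finset.coe_Icc, Set.mem_Icc] at hi hj
    by_contra hne
    rcases Nat.lt_or_ge i j with h | h
    · have := pvStep_rep_one h hij (Nat.find_spec hP)
      exact Nat.find_min hP (show i < k by omega) this
    · have hlt : j < i := by omega
      have := pvStep_rep_one hlt hij.symm (Nat.find_spec hP)
      exact Nat.find_min hP (show j < k by omega) this
  have hcard := Finset.card_le_card_of_injOn _ hmaps hinj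
  rw [Nat.card_Icc, Int.card_Icc] at hcard
  simp at hcard
  omega

lemma exists_rep {a : Int} (h0 : 0 ≤ a) (h1 : a < 10 ^ 11) :
    ∃ s t, 1 ≤ s ∧ s < t ∧ t ≤ 20001 ∧ pvStep^[s] a = pvStep^[t] a := by
  have hcard : (Finset.Icc (0 : Int) 9999).card < (Finset.Icc 1 20001).card := by
    rw [Nat.card_Icc, Int.card_Icc]; simp
  have hmaps : Set.MapsTo (fun i => pvStep^[i] a) ↑(Finset.Icc 1 20001) ↑(Finset.Icc (0 : Int) 9999) := by
    intro i hi
    simp only [Finset.coe_Icc, Set.mem_Icc] at hi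
    have := pvStep_iter_bound h0 h1 i hi.1
    simp only [Finset.coe_Icc, Set.mem_Icc]
    omega
  obtain ⟨x, hx, y, hy, hne, heq⟩ := Finset.exists_ne_map_eq_of_card_lt_of_maps_to hcard hmaps
  simp only [Finset.mem_Icc] at hx hy
  rcases Nat.lt_or_ge x y with h | h
  · exact ⟨x, y, hx.1, h, hy.2, heq⟩
  · exact ⟨y, x, hy.1, by omega, hx.2, heq.symm⟩

lemma exit_exists_of_not_one {a : Int} (h0 : 0 ≤ a) (h1 : a < 10 ^ 11) :
    ∃ j, j < 100000 ∧ (pvStep^[2 * j + 1] a = 1 ∨ pvStep^[j] a = pvStep^[2 * j + 1] a) := by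
  obtain ⟨s, t, hs1, hst, ht, heq⟩ := exists_rep h0 h1
  set p := t - s with hp
  have hppos : 0 < p := by omega
  have hmod : s % p < p := Nat.mod_lt _ hppos
  set j := s + (p - 1 - s % p) with hj
  have hdm : p * (s / p) + s % p = s := Nat.div_add_mod s p
  have hj1 : j + 1 = p * (s / p + 1) := by
    have : p * (s / p + 1) = p * (s / p) + p := by ring
    omega
  refine ⟨j, by omega, Or.inr ?_⟩
  have hper : pvStep^[s + p] a = pvStep^[s] a := by
    have : s + p = t := by omega
    rw [this, heq]
  have := pvStep_per_mul hper (s / p + 1) (p - 1 - s % p)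
  have e1 : s + (p - 1 - s % p) + (s / p + 1) * p = 2 * j + 1 := by
    have : (s / p + 1) * p = p * (s / p + 1) := by ring
    omega
  rw [e1] at this
  exact this.symm

-- ===== VERDICT (by name: the statement is the Claim_ definition above) =====
theorem is_oct_magic_spec : Claim_equal_is_oct_magic := by
  intro number hDom hPre
  unfold Spec_is_oct_magic
  unfold Dom_is_oct_magic pvDomInt at hDom
  unfold Pre_is_oct_magic at hPre
  rw [decide_eq_true_iff] at hDom
  have hA : is_oct_magic number =
      (is_oct_magicLoop ((pvOctDec number.toNat : Nat) : Int) PySem.Set.empty 100000).getD false := by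
    unfold is_oct_magic
    rw [if_neg (by omega)]
  have hB : is_oct_magic_alt number =
      floydLoop ((pvOctDec number.toNat : Nat) : Int) (pvStep ((pvOctDec number.toNat : Nat) : Int)) 100000 := by
    unfold is_oct_magic_alt
    rw [if_neg (by omega)]
  rw [hA, hB]
  set a0 : Int := ((pvOctDec number.toNat : Nat) : Int) with ha0
  have h0 : 0 ≤ a0 := Int.natCast_nonneg _
  have h1 : a0 < 10 ^ 11 := by
    have hn : number.toNat < 8 ^ 11 := by omega
    have := pvOctDec_lt hn
    rw [ha0]
    exact_mod_cast this
  have hfl : floydLoop a0 (pvStep a0) 100000 =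
      floydLoop (pvStep^[0] a0) (pvStep^[2 * 0 + 1] a0) 100000 := by
    norm_num
  by_cases hP : ∃ k, pvStep^[k] a0 = 1
  · have hk := Nat.find_spec hP
    have hkle : Nat.find hP ≤ 10000 := first_one_le h0 h1 hP
    have hAres : is_oct_magicLoop a0 PySem.Set.empty 100000 = some true := by
      apply loopA_true (Nat.find hP) a0 PySem.Set.empty 100000 hk
        (fun m hm => Nat.find_min hP hm)
      · intro x hx
        exact absurd hx (List.not_mem_nil)
      · omega
    have hBres : floydLoop a0 (pvStep a0) 100000 = true := by
      rw [hfl]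
      rw [floyd_run 100000 a0 0
        ⟨Nat.find hP, Nat.zero_le _, by omega,
          Or.inl (pvStep_one_after hk (by omega))⟩]
      exact hP
    rw [hAres, hBres]
    rfl
  · have hno : ∀ m, pvStep^[m] a0 ≠ 1 := by
      intro m hm; exact hP ⟨m, hm⟩
    have hAres : is_oct_magicLoop a0 PySem.Set.empty 100000 = some false := by
      apply loopA_false 100000 a0 PySem.Set.empty hno h1 List.nodup_nil
      · intro x hx
        exact absurd hx (List.not_mem_nil)
      · simp
    have hBres : floydLoop a0 (pvStep a0) 100000 = false := by
      rw [hfl]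
      obtain ⟨j, hj, hcond⟩ := exit_exists_of_not_one h0 h1
      have hiff := floyd_run 100000 a0 0 ⟨j, Nat.zero_le _, by omega, hcond⟩
      cases hb : floydLoop (pvStep^[0] a0) (pvStep^[2 * 0 + 1] a0) 100000
      · rfl
      · exact absurd (hiff.mp hb) hP
    rw [hAres, hBres]
    rfl
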